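-- pv_equiv track=rewrite | github.com/xraisik/algorithm_physics_labs | 3rd lab/lab_3_1.py | get_numbers_in_between
-- ===== SOURCE A (Python) =====
-- def get_numbers_in_between(a: list[int], b: list[int]) -> list[int]:
--     result = []
--
--     max_a = max(a)
--     min_b = min(b)
--
--     for i in range(max_a, min_b + 1):
--         is_divisible_by_a = all(i % num == 0 for num in a)
--
--         divides_all_b = all(num % i == 0 for num in b)
--
--         if is_divisible_by_a and divides_all_b:
--             result.append(i)
--
--     return result
-- ===== SOURCE B (Python) =====
-- def _gcd(x, y):
--     x = abs(x)
--     y = abs(y)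
--     while y:
--         x, y = y, x % y
--     return x
--
--
-- def get_numbers_in_between(a, b):
--     lo = max(a)
--     hi = min(b)
--     if hi < lo:
--         return []
--     L = 1
--     for x in set(a):
--         L = abs(L * x) // _gcd(L, x)
--     G = 0
--     for y in set(b):
--         G = _gcd(G, y)
--     start = ((lo + L - 1) // L) * L
--     return [i for i in range(start, hi + 1, L) if G % i == 0]
-- ===== Notes on version B (the rewrite author's own statement) =====
-- stated objective: alternative
-- what changed: Instead of scanning every integer in [max(a), min(b)] and testing divisibility against every element of both lists, B computes L=lcm(a) and G=gcd(b) over the distinct elements and enumerates only the multiples of L in the range, keeping those that divide G.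
-- outside the precondition, e.g. on get_numbers_in_between([9, -7, 0], [13]): A returns [], B raises ZeroDivisionError
import Mathlib
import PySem

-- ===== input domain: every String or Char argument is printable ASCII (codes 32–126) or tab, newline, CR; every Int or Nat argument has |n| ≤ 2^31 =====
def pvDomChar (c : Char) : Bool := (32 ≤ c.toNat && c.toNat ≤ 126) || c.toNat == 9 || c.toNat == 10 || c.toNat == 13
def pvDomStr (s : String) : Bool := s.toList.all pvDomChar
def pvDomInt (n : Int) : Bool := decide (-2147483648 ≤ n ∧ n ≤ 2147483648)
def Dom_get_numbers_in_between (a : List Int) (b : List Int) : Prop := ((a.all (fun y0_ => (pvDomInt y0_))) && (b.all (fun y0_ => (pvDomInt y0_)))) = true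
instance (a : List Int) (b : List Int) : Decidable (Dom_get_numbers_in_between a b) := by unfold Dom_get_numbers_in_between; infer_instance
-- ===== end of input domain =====

-- B replaces A's scan of every integer in [max(a), min(b)] (testing all of a and b at each i)
-- by computing L = lcm(a) and G = gcd(b) over the distinct elements and enumerating only the
-- multiples of L in the range, keeping those dividing G (a different algorithm; equal value).


-- ===== PORT A =====
def get_numbers_in_between (a : List Int) (b : List Int) : List Int :=
  match PySem.List.max? a (fun x => x), PySem.List.min? b (fun x => x) with
  | some max_a, some min_b =>
      (PySem.List.pyRange max_a (min_b + 1) 1).foldl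
        (fun result i =>
          let is_divisible_by_a := a.all (fun num => PySem.Int.mod i num == 0)
          let divides_all_b := b.all (fun num => PySem.Int.mod num i == 0)
          if is_divisible_by_a && divides_all_b then result ++ [i] else result)
        []
  | _, _ => []  -- max()/min() of an empty list raises ValueError; excluded by Pre_

-- ===== PORT B =====
-- Source B's hand-written Euclid _gcd (abs both, then while y: x, y = y, x % y)
def euclid (x : Nat) (y : Nat) : Nat :=
  if h : y = 0 then x else euclid y (x % y)
termination_by y
decreasing_by exact Nat.mod_lt _ (Nat.pos_of_ne_zero h)

def pyGcd (x : Int) (y : Int) : Int := (euclid x.natAbs y.natAbs : Nat)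

def get_numbers_in_between_alt (a : List Int) (b : List Int) : List Int :=
  (PySem.List.max? a (fun x => x)).elim [] fun lo =>
    (PySem.List.min? b (fun x => x)).elim [] fun hi =>
      if hi < lo then []
      else
        let L : Int := (PySem.Set.ofList a).foldl (fun L x => PySem.Int.floordiv ((L * x).natAbs : Int) (pyGcd L x)) 1
        let G : Int := (PySem.Set.ofList b).foldl (fun G y => pyGcd G y) 0
        let start : Int := PySem.Int.floordiv (lo + L - 1) L * L
        (PySem.List.pyRange start (hi + 1) L).filter (fun i => PySem.Int.mod G i == 0)

-- ===== PRECONDITION & SPEC =====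
-- Pre_ excludes empty lists (max/min raise ValueError), nonempty ranges containing 0
-- (num % 0 raises ZeroDivisionError in A), and 0 ∈ a with a nonempty range (whether A
-- completes there depends on all()'s short-circuit order; B has lcm(a) = 0 and raises
-- ZeroDivisionError).
def Pre_get_numbers_in_between (a : List Int) (b : List Int) : Prop :=
  a ≠ [] ∧ b ≠ [] ∧
  ((PySem.List.min? b (fun x => x)).getD 0 < (PySem.List.max? a (fun x => x)).getD 0 ∨
   ((0:Int) ∉ a ∧
     (0 < (PySem.List.max? a (fun x => x)).getD 0 ∨ (PySem.List.min? b (fun x => x)).getD 0 < 0)))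
instance (a : List Int) (b : List Int) : Decidable (Pre_get_numbers_in_between a b) := by
  unfold Pre_get_numbers_in_between; infer_instance

def pvWitness_get_numbers_in_between : List Int × List Int := ([2], [12])

def Spec_get_numbers_in_between (a : List Int) (b : List Int) (out : List Int) : Prop := out = get_numbers_in_between_alt a b
instance (a : List Int) (b : List Int) (out : List Int) : Decidable (Spec_get_numbers_in_between a b out) := by unfold Spec_get_numbers_in_between; infer_instance

-- ===== CLAIM (what is proved, stated in full; the proofs are below) =====
def Claim_equal_get_numbers_in_between : Prop := ∀ (a : List Int) (b : List Int), Dom_get_numbers_in_between a b → Pre_get_numbers_in_between a b → Spec_get_numbers_in_between a b (get_numbers_in_between a b)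

-- ===== LEMMAS AND PROOFS =====

lemma euclid_eq_gcd (x y : Nat) : euclid x y = Nat.gcd y x := by
  induction y using Nat.strong_induction_on generalizing x with
  | _ y ih =>
    unfold euclid
    split
    · simp_all
    · next h =>
      rw [ih (x % y) (Nat.mod_lt _ (Nat.pos_of_ne_zero h)) y, Nat.gcd_rec y x]

lemma dvd_natCast_iff (i : Int) (n : Nat) : i ∣ (n : Int) ↔ i.natAbs ∣ n := by
  rw [← Int.natAbs_dvd_natAbs, Int.natAbs_natCast]

lemma natCast_dvd_iff (n : Nat) (i : Int) : (n : Int) ∣ i ↔ n ∣ i.natAbs := by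
  rw [← Int.natAbs_dvd_natAbs, Int.natAbs_natCast]

lemma pyGcd_dvd_iff (i x y : Int) : i ∣ pyGcd x y ↔ i ∣ x ∧ i ∣ y := by
  rw [pyGcd, euclid_eq_gcd, dvd_natCast_iff, Nat.dvd_gcd_iff,
    Int.natAbs_dvd_natAbs, Int.natAbs_dvd_natAbs]
  tauto

lemma gcd_fold_dvd_iff (i : Int) (b : List Int) (g0 : Int) :
    i ∣ b.foldl (fun G y => pyGcd G y) g0 ↔ i ∣ g0 ∧ ∀ y ∈ b, i ∣ y := by
  induction b generalizing g0 with
  | nil => simp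
  | cons y t ih =>
    simp only [List.foldl_cons, ih, pyGcd_dvd_iff, List.mem_cons]
    constructor
    · rintro ⟨⟨h1, h2⟩, h3⟩
      exact ⟨h1, fun z hz => by rcases hz with rfl | hz; exact h2; exact h3 z hz⟩
    · rintro ⟨h1, h2⟩
      exact ⟨⟨h1, h2 y (Or.inl rfl)⟩, fun z hz => h2 z (Or.inr hz)⟩

lemma lcm_fold (a : List Int) (h0 : (0:Int) ∉ a) :
    ∀ g0 : Int, 0 < g0 →
      0 < a.foldl (fun L x => PySem.Int.floordiv ((L * x).natAbs : Int) (pyGcd L x)) g0 ∧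
      ∀ i : Int, a.foldl (fun L x => PySem.Int.floordiv ((L * x).natAbs : Int) (pyGcd L x)) g0 ∣ i ↔
        (g0 ∣ i ∧ ∀ x ∈ a, x ∣ i) := by
  induction a with
  | nil => intro g0 hg; simpa using hg
  | cons x t ih =>
    intro g0 hg
    have hx : x ≠ 0 := fun h => h0 (by simp [h])
    have hstep : PySem.Int.floordiv ((g0 * x).natAbs : Int) (pyGcd g0 x) =
        ((Nat.lcm g0.natAbs x.natAbs : Nat) : Int) := by
      rw [pyGcd, euclid_eq_gcd, Int.natAbs_mul, PySem.Int.floordiv_natCast,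
        Nat.lcm, Nat.gcd_comm]
    have hpos : 0 < ((Nat.lcm g0.natAbs x.natAbs : Nat) : Int) := by
      have := Nat.pos_of_ne_zero (Nat.lcm_ne_zero
        (Int.natAbs_ne_zero.mpr (show g0 ≠ 0 by omega)) (Int.natAbs_ne_zero.mpr hx))
      exact_mod_cast this
    have h0t : (0:Int) ∉ t := fun h => h0 (List.mem_cons_of_mem _ h)
    obtain ⟨ihp, ihd⟩ := ih h0t _ hpos
    simp only [List.foldl_cons, hstep]
    refine ⟨ihp, fun i => ?_⟩
    rw [ihd i, natCast_dvd_iff, Nat.lcm_dvd_iff, Int.natAbs_dvd_natAbs, Int.natAbs_dvd_natAbs]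
    simp only [List.mem_cons]
    constructor
    · rintro ⟨⟨h1, h2⟩, h3⟩
      exact ⟨h1, fun z hz => by rcases hz with rfl | hz; exact h2; exact h3 z hz⟩
    · rintro ⟨h1, h2⟩
      exact ⟨⟨h1, h2 x (Or.inl rfl)⟩, fun z hz => h2 z (Or.inr hz)⟩

lemma pairwise_lt_pyRange_pos (s hi L : Int) (hL : 0 < L) :
    (PySem.List.pyRange s hi L).Pairwise (· < ·) := by
  rw [PySem.List.pyRange_of_pos _ _ hL]
  refine List.pairwise_map.mpr ((List.pairwise_lt_range).imp (fun {p q} h => ?_))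
  have : L * (p : Int) < L * (q : Int) := mul_lt_mul_of_pos_left (by exact_mod_cast h) hL
  omega

lemma multiples_filter_eq_pyRange (L lo hi : Int) (hL : 0 < L) :
    (PySem.List.pyRange lo hi 1).filter (fun i => decide (L ∣ i)) =
      PySem.List.pyRange (PySem.Int.floordiv (lo + L - 1) L * L) hi L := by
  set s := PySem.Int.floordiv (lo + L - 1) L * L with hs
  have hdvd : L ∣ s := Dvd.intro _ (mul_comm _ _)
  have hkey := PySem.Int.floordiv_mul_add_mod (lo + L - 1) L
  have hr0 := PySem.Int.mod_nonneg (lo + L - 1) hL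
  have hrL := PySem.Int.mod_lt (lo + L - 1) hL
  rw [← hs] at hkey
  have hbounds : lo ≤ s ∧ s < lo + L := by omega
  have hp2 := pairwise_lt_pyRange_pos s hi L hL
  have hp1 := List.Pairwise.filter (fun i => decide (L ∣ i))
    (PySem.List.pairwise_lt_pyRange_one lo hi)
  refine List.Perm.eq_of_pairwise (fun p q _ _ h1 h2 => absurd h2 (by omega)) hp1 hp2 ?_
  rw [List.perm_ext_iff_of_nodup
      (List.Nodup.filter _ (PySem.List.nodup_pyRange_one lo hi)) (hp2.imp fun h => ne_of_lt h)]
  intro x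
  simp only [List.mem_filter, PySem.List.mem_pyRange_one,
    PySem.List.mem_pyRange_iff_of_pos hL, decide_eq_true_eq]
  constructor
  · rintro ⟨⟨hlo, hhix⟩, hdx⟩
    refine ⟨?_, hhix, (dvd_sub_right hdx).mpr hdvd⟩
    by_contra hxs
    have h1 : L ∣ s - x := (dvd_sub_right hdvd).mpr hdx
    have h2 : L ≤ s - x := Int.le_of_dvd (by omega) h1
    omega
  · rintro ⟨hsx, hhix, hdx⟩
    have hlx : L ∣ x := by
      have := dvd_add hdx hdvd
      simpa using this
    exact ⟨⟨by omega, hhix⟩, hlx⟩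

-- ===== VERDICT (by name: the statement is the Claim_ definition above) =====
theorem get_numbers_in_between_spec : Claim_equal_get_numbers_in_between := by
  intro a b _hdom hpre
  obtain ⟨ha, hb, hcond⟩ := hpre
  unfold Spec_get_numbers_in_between
  cases hma : PySem.List.max? a (fun x => x) with
  | none => exact absurd ((PySem.List.max?_eq_none_iff a _).mp hma) ha
  | some lo =>
  cases hmb : PySem.List.min? b (fun x => x) with
  | none => exact absurd ((PySem.List.min?_eq_none_iff b _).mp hmb) hb
  | some hi =>
  rw [hma, hmb] at hcond
  simp only [Option.getD_some] at hcond
  simp only [get_numbers_in_between, get_numbers_in_between_alt, hma, hmb, Option.elim_some]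
  by_cases hlt : hi < lo
  · rw [if_pos hlt, PySem.List.pyRange_one_eq_nil (by omega : hi + 1 ≤ lo)]
    rfl
  · rw [if_neg hlt]
    rcases hcond with h1 | ⟨h0, _hz⟩
    · exact absurd h1 hlt
    have h0s : (0:Int) ∉ PySem.Set.ofList a := fun h => h0 ((PySem.Set.mem_ofList _ _).mp h)
    obtain ⟨hLpos, hLdvd⟩ := lcm_fold (PySem.Set.ofList a) h0s 1 one_pos
    rw [PySem.List.foldl_append_if
      (fun i => a.all (fun num => PySem.Int.mod i num == 0) &&
                b.all (fun num => PySem.Int.mod num i == 0)) (fun i => i) _ []]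
    rw [← multiples_filter_eq_pyRange _ lo (hi + 1) hLpos, List.filter_filter]
    simp only [List.nil_append, List.map_id']
    apply List.filter_congr
    intro i _hi
    rw [Bool.eq_iff_iff]
    simp only [Bool.and_eq_true, List.all_eq_true, beq_iff_eq,
      PySem.Int.mod_eq_zero_iff_dvd, decide_eq_true_eq, hLdvd, gcd_fold_dvd_iff,
      PySem.Set.mem_ofList, dvd_zero, true_and, one_dvd]
    tauto
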